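-- pv_equiv track=rewrite | github.com/HongbangYuan/OmniReward | utils/video_utils.py | parse_judgement_score
-- ===== SOURCE A (Python) =====
-- def parse_judgement_score(generation: str):
--     labels_dict = {
--         "[[1]]": "1",
--         "[[2]]": "2",
--         "[[3]]": "3",
--         "[[4]]": "4",
--         "[[5]]": "5",
--     }
--     # 统计出现在 generation 中的标签数量
--     matches = [label for label in labels_dict if label in generation]
--
--     # 如果有两个或以上标签同时出现，返回 None
--     if len(matches) >= 2:
--         return None
--
--     for kw, label in labels_dict.items():
--         if kw in generation:
--             return label
--     return None
-- ===== SOURCE B (Python) =====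
-- def parse_judgement_score(generation: str):
--     found = {generation[i + 2]
--              for i in range(len(generation) - 4)
--              if generation[i:i + 5] in ("[[1]]", "[[2]]", "[[3]]", "[[4]]", "[[5]]")}
--     if len(found) == 1:
--         (c,) = found
--         return c
--     return None
-- ===== Notes on version B (the rewrite author's own statement) =====
-- stated objective: idiomatic
-- what changed: Replaces A's five fixed substring-membership tests plus a second redundant lookup loop over the label dict by a single left-to-right window scan that collects the set of distinct bracketed score digits and returns the digit iff that set is a singleton.
import Mathlib
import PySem

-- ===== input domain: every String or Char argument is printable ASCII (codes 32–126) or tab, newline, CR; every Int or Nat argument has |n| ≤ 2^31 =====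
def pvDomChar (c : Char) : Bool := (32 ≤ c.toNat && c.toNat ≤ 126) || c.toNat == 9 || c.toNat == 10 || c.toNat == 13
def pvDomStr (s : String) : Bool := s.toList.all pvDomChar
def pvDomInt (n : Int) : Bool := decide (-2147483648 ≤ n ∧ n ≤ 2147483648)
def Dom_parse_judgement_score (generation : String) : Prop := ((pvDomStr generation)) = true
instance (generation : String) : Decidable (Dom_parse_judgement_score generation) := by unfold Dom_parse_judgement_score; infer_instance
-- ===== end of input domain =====

-- B replaces A's five fixed substring-membership tests plus a second lookup loop by one
-- left-to-right scan collecting the set of bracketed score digits (objective: idiomatic).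

-- ===== PORT A =====
def pvLabelsDict : List (String × String) :=
  [("[[1]]", "1"), ("[[2]]", "2"), ("[[3]]", "3"), ("[[4]]", "4"), ("[[5]]", "5")]

def parse_judgement_score (generation : String) : Option String :=
  let matchesList := (pvLabelsDict.map Prod.fst).filter (fun label => PySem.Str.isIn label generation)
  if matchesList.length ≥ 2 then none
  else
    match pvLabelsDict.find? (fun p => PySem.Str.isIn p.1 generation) with
    | some p => some p.2
    | none => none

-- ===== PORT B =====
-- Source B's set comprehension: scan every window, collect the digit of each score-marker window
def pvScanDigits : List Char → List Char
  | '[' :: (rest@('[' :: c :: ']' :: ']' :: _)) =>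
      if c = '1' ∨ c = '2' ∨ c = '3' ∨ c = '4' ∨ c = '5'
      then c :: pvScanDigits rest else pvScanDigits rest
  | _ :: rest => pvScanDigits rest
  | [] => []

-- '(c,) = found; return c' when the set is a singleton, else None
def pvPick (found : List Char) : Option String :=
  match found with
  | [c] => some (String.ofList [c])
  | _ => none

def parse_judgement_score_alt (generation : String) : Option String :=
  pvPick (PySem.Set.ofList (pvScanDigits generation.toList))

-- ===== PRECONDITION & SPEC =====
def Spec_parse_judgement_score (generation : String) (out : Option String) : Prop := out = parse_judgement_score_alt generation
instance (generation : String) (out : Option String) : Decidable (Spec_parse_judgement_score generation out) := by unfold Spec_parse_judgement_score; infer_instance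

-- ===== CLAIM (what is proved, stated in full; the proofs are below) =====
def Claim_equal_parse_judgement_score : Prop := ∀ (generation : String), Dom_parse_judgement_score generation → Spec_parse_judgement_score generation (parse_judgement_score generation)

-- ===== LEMMAS AND PROOFS =====

-- the scan finds exactly the digits whose score marker is an infix of the text
lemma pvMem_scan (l : List Char) (c : Char) :
    c ∈ pvScanDigits l ↔
      ((c = '1' ∨ c = '2' ∨ c = '3' ∨ c = '4' ∨ c = '5') ∧ ['[', '[', c, ']', ']'] <:+: l) := by
  induction l using pvScanDigits.induct with
  | case1 d t hd ih =>
    simp only [pvScanDigits, if_pos hd, List.mem_cons, ih, List.infix_cons_iff,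
      List.cons_prefix_cons, List.nil_prefix, and_true, true_and]
    by_cases hc : c = d
    · subst hc; simp [hd]
    · simp [hc]
  | case2 d t hd ih =>
    simp only [pvScanDigits, if_neg hd, ih, List.infix_cons_iff,
      List.cons_prefix_cons, List.nil_prefix, and_true, true_and]
    by_cases hc : c = d
    · subst hc; simp [hd]
    · simp [hc]
  | case3 a rest hshape ih =>
    simp only [pvScanDigits, ih, List.infix_cons_iff]
    constructor
    · rintro ⟨hdig, hinf⟩; exact ⟨hdig, Or.inr hinf⟩
    · rintro ⟨hdig, (hpre | hinf)⟩
      · exfalso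
        obtain ⟨rfl, hpre2⟩ := List.cons_prefix_cons.1 hpre
        match rest, hpre2 with
        | x1 :: x2 :: x3 :: x4 :: tt, hpre2 =>
          obtain ⟨rfl, hpre3⟩ := List.cons_prefix_cons.1 hpre2
          obtain ⟨rfl, hpre4⟩ := List.cons_prefix_cons.1 hpre3
          obtain ⟨rfl, hpre5⟩ := List.cons_prefix_cons.1 hpre4
          obtain ⟨rfl, -⟩ := List.cons_prefix_cons.1 hpre5
          exact hshape c tt rfl rfl
        | [], h => simp at h
        | [x1], h => simp [List.cons_prefix_cons] at h
        | [x1, x2], h => simp [List.cons_prefix_cons] at h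
        | [x1, x2, x3], h => simp [List.cons_prefix_cons] at h
      · exact ⟨hdig, hinf⟩
  | case4 => simp [pvScanDigits]

lemma pvEqSingleton {S : List Char} {a : Char} (hnd : S.Nodup) (ha : a ∈ S)
    (hall : ∀ x ∈ S, x = a) : S = [a] := by
  cases S with
  | nil => cases ha
  | cons y t =>
    obtain rfl : y = a := hall y (by simp)
    cases t with
    | nil => rfl
    | cons z u =>
      obtain rfl : z = y := hall z (by simp)
      simp [List.nodup_cons] at hnd

lemma pvPick_two {S : List Char} {a b : Char} (ha : a ∈ S) (hb : b ∈ S) (hab : a ≠ b) :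
    pvPick S = none := by
  match S with
  | [] => rfl
  | [c] =>
    simp only [List.mem_singleton] at ha hb
    exact absurd (ha.trans hb.symm) hab
  | c1 :: c2 :: t => rfl

-- ===== VERDICT (by name: the statement is the Claim_ definition above) =====
theorem parse_judgement_score_spec : Claim_equal_parse_judgement_score := by
  intro g _
  unfold Spec_parse_judgement_score parse_judgement_score parse_judgement_score_alt
  have hS : ∀ c, c ∈ PySem.Set.ofList (pvScanDigits g.toList) ↔
      ((c = '1' ∨ c = '2' ∨ c = '3' ∨ c = '4' ∨ c = '5') ∧ ['[', '[', c, ']', ']'] <:+: g.toList) := by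
    intro c; rw [PySem.Set.mem_ofList, pvMem_scan]
  have t1 : "[[1]]".toList = ['[', '[', '1', ']', ']'] := by decide
  have b1 : PySem.Chars.isIn ['[', '[', '1', ']', ']'] g.toList = decide (['[', '[', '1', ']', ']'] <:+: g.toList) := by
    rw [Bool.eq_iff_iff, PySem.Chars.isIn_iff_infix, decide_eq_true_iff]
  have t2 : "[[2]]".toList = ['[', '[', '2', ']', ']'] := by decide
  have b2 : PySem.Chars.isIn ['[', '[', '2', ']', ']'] g.toList = decide (['[', '[', '2', ']', ']'] <:+: g.toList) := by
    rw [Bool.eq_iff_iff, PySem.Chars.isIn_iff_infix, decide_eq_true_iff]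
  have t3 : "[[3]]".toList = ['[', '[', '3', ']', ']'] := by decide
  have b3 : PySem.Chars.isIn ['[', '[', '3', ']', ']'] g.toList = decide (['[', '[', '3', ']', ']'] <:+: g.toList) := by
    rw [Bool.eq_iff_iff, PySem.Chars.isIn_iff_infix, decide_eq_true_iff]
  have t4 : "[[4]]".toList = ['[', '[', '4', ']', ']'] := by decide
  have b4 : PySem.Chars.isIn ['[', '[', '4', ']', ']'] g.toList = decide (['[', '[', '4', ']', ']'] <:+: g.toList) := by
    rw [Bool.eq_iff_iff, PySem.Chars.isIn_iff_infix, decide_eq_true_iff]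
  have t5 : "[[5]]".toList = ['[', '[', '5', ']', ']'] := by decide
  have b5 : PySem.Chars.isIn ['[', '[', '5', ']', ']'] g.toList = decide (['[', '[', '5', ']', ']'] <:+: g.toList) := by
    rw [Bool.eq_iff_iff, PySem.Chars.isIn_iff_infix, decide_eq_true_iff]
  by_cases h1 : ['[', '[', '1', ']', ']'] <:+: g.toList <;>
    by_cases h2 : ['[', '[', '2', ']', ']'] <:+: g.toList <;>
    by_cases h3 : ['[', '[', '3', ']', ']'] <:+: g.toList <;>
    by_cases h4 : ['[', '[', '4', ']', ']'] <:+: g.toList <;>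
    by_cases h5 : ['[', '[', '5', ']', ']'] <:+: g.toList
  · -- branch
    rw [pvPick_two ((hS '1').2 ⟨by simp, h1⟩) ((hS '2').2 ⟨by simp, h2⟩) (by decide)]
    simp [pvLabelsDict, List.filter, List.find?, t1, t2, t3, t4, t5, b1, b2, b3, b4, b5, h1, h2, h3, h4, h5, pvPick]
  · -- branch
    rw [pvPick_two ((hS '1').2 ⟨by simp, h1⟩) ((hS '2').2 ⟨by simp, h2⟩) (by decide)]
    simp [pvLabelsDict, List.filter, List.find?, t1, t2, t3, t4, t5, b1, b2, b3, b4, b5, h1, h2, h3, h4, h5, pvPick]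
  · -- branch
    rw [pvPick_two ((hS '1').2 ⟨by simp, h1⟩) ((hS '2').2 ⟨by simp, h2⟩) (by decide)]
    simp [pvLabelsDict, List.filter, List.find?, t1, t2, t3, t4, t5, b1, b2, b3, b4, b5, h1, h2, h3, h4, h5, pvPick]
  · -- branch
    rw [pvPick_two ((hS '1').2 ⟨by simp, h1⟩) ((hS '2').2 ⟨by simp, h2⟩) (by decide)]
    simp [pvLabelsDict, List.filter, List.find?, t1, t2, t3, t4, t5, b1, b2, b3, b4, b5, h1, h2, h3, h4, h5, pvPick]
  · -- branch
    rw [pvPick_two ((hS '1').2 ⟨by simp, h1⟩) ((hS '2').2 ⟨by simp, h2⟩) (by decide)]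
    simp [pvLabelsDict, List.filter, List.find?, t1, t2, t3, t4, t5, b1, b2, b3, b4, b5, h1, h2, h3, h4, h5, pvPick]
  · -- branch
    rw [pvPick_two ((hS '1').2 ⟨by simp, h1⟩) ((hS '2').2 ⟨by simp, h2⟩) (by decide)]
    simp [pvLabelsDict, List.filter, List.find?, t1, t2, t3, t4, t5, b1, b2, b3, b4, b5, h1, h2, h3, h4, h5, pvPick]
  · -- branch
    rw [pvPick_two ((hS '1').2 ⟨by simp, h1⟩) ((hS '2').2 ⟨by simp, h2⟩) (by decide)]
    simp [pvLabelsDict, List.filter, List.find?, t1, t2, t3, t4, t5, b1, b2, b3, b4, b5, h1, h2, h3, h4, h5, pvPick]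
  · -- branch
    rw [pvPick_two ((hS '1').2 ⟨by simp, h1⟩) ((hS '2').2 ⟨by simp, h2⟩) (by decide)]
    simp [pvLabelsDict, List.filter, List.find?, t1, t2, t3, t4, t5, b1, b2, b3, b4, b5, h1, h2, h3, h4, h5, pvPick]
  · -- branch
    rw [pvPick_two ((hS '1').2 ⟨by simp, h1⟩) ((hS '3').2 ⟨by simp, h3⟩) (by decide)]
    simp [pvLabelsDict, List.filter, List.find?, t1, t2, t3, t4, t5, b1, b2, b3, b4, b5, h1, h2, h3, h4, h5, pvPick]
  · -- branch
    rw [pvPick_two ((hS '1').2 ⟨by simp, h1⟩) ((hS '3').2 ⟨by simp, h3⟩) (by decide)]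
    simp [pvLabelsDict, List.filter, List.find?, t1, t2, t3, t4, t5, b1, b2, b3, b4, b5, h1, h2, h3, h4, h5, pvPick]
  · -- branch
    rw [pvPick_two ((hS '1').2 ⟨by simp, h1⟩) ((hS '3').2 ⟨by simp, h3⟩) (by decide)]
    simp [pvLabelsDict, List.filter, List.find?, t1, t2, t3, t4, t5, b1, b2, b3, b4, b5, h1, h2, h3, h4, h5, pvPick]
  · -- branch
    rw [pvPick_two ((hS '1').2 ⟨by simp, h1⟩) ((hS '3').2 ⟨by simp, h3⟩) (by decide)]
    simp [pvLabelsDict, List.filter, List.find?, t1, t2, t3, t4, t5, b1, b2, b3, b4, b5, h1, h2, h3, h4, h5, pvPick]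
  · -- branch
    rw [pvPick_two ((hS '1').2 ⟨by simp, h1⟩) ((hS '4').2 ⟨by simp, h4⟩) (by decide)]
    simp [pvLabelsDict, List.filter, List.find?, t1, t2, t3, t4, t5, b1, b2, b3, b4, b5, h1, h2, h3, h4, h5, pvPick]
  · -- branch
    rw [pvPick_two ((hS '1').2 ⟨by simp, h1⟩) ((hS '4').2 ⟨by simp, h4⟩) (by decide)]
    simp [pvLabelsDict, List.filter, List.find?, t1, t2, t3, t4, t5, b1, b2, b3, b4, b5, h1, h2, h3, h4, h5, pvPick]
  · -- branch
    rw [pvPick_two ((hS '1').2 ⟨by simp, h1⟩) ((hS '5').2 ⟨by simp, h5⟩) (by decide)]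
    simp [pvLabelsDict, List.filter, List.find?, t1, t2, t3, t4, t5, b1, b2, b3, b4, b5, h1, h2, h3, h4, h5, pvPick]
  · -- branch
    have hB : PySem.Set.ofList (pvScanDigits g.toList) = ['1'] := by
      refine pvEqSingleton (PySem.Set.nodup_ofList _) ?_ ?_
      · exact (hS '1').2 ⟨by simp, h1⟩
      · intro x hx
        rcases (hS x).1 hx with ⟨hd, hp⟩
        rcases hd with rfl|rfl|rfl|rfl|rfl <;> [rfl; exact absurd hp h2; exact absurd hp h3; exact absurd hp h4; exact absurd hp h5]
    rw [hB]
    simp [pvLabelsDict, List.filter, List.find?, t1, t2, t3, t4, t5, b1, b2, b3, b4, b5, h1, h2, h3, h4, h5, pvPick]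
  · -- branch
    rw [pvPick_two ((hS '2').2 ⟨by simp, h2⟩) ((hS '3').2 ⟨by simp, h3⟩) (by decide)]
    simp [pvLabelsDict, List.filter, List.find?, t1, t2, t3, t4, t5, b1, b2, b3, b4, b5, h1, h2, h3, h4, h5, pvPick]
  · -- branch
    rw [pvPick_two ((hS '2').2 ⟨by simp, h2⟩) ((hS '3').2 ⟨by simp, h3⟩) (by decide)]
    simp [pvLabelsDict, List.filter, List.find?, t1, t2, t3, t4, t5, b1, b2, b3, b4, b5, h1, h2, h3, h4, h5, pvPick]
  · -- branch
    rw [pvPick_two ((hS '2').2 ⟨by simp, h2⟩) ((hS '3').2 ⟨by simp, h3⟩) (by decide)]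
    simp [pvLabelsDict, List.filter, List.find?, t1, t2, t3, t4, t5, b1, b2, b3, b4, b5, h1, h2, h3, h4, h5, pvPick]
  · -- branch
    rw [pvPick_two ((hS '2').2 ⟨by simp, h2⟩) ((hS '3').2 ⟨by simp, h3⟩) (by decide)]
    simp [pvLabelsDict, List.filter, List.find?, t1, t2, t3, t4, t5, b1, b2, b3, b4, b5, h1, h2, h3, h4, h5, pvPick]
  · -- branch
    rw [pvPick_two ((hS '2').2 ⟨by simp, h2⟩) ((hS '4').2 ⟨by simp, h4⟩) (by decide)]
    simp [pvLabelsDict, List.filter, List.find?, t1, t2, t3, t4, t5, b1, b2, b3, b4, b5, h1, h2, h3, h4, h5, pvPick]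
  · -- branch
    rw [pvPick_two ((hS '2').2 ⟨by simp, h2⟩) ((hS '4').2 ⟨by simp, h4⟩) (by decide)]
    simp [pvLabelsDict, List.filter, List.find?, t1, t2, t3, t4, t5, b1, b2, b3, b4, b5, h1, h2, h3, h4, h5, pvPick]
  · -- branch
    rw [pvPick_two ((hS '2').2 ⟨by simp, h2⟩) ((hS '5').2 ⟨by simp, h5⟩) (by decide)]
    simp [pvLabelsDict, List.filter, List.find?, t1, t2, t3, t4, t5, b1, b2, b3, b4, b5, h1, h2, h3, h4, h5, pvPick]
  · -- branch
    have hB : PySem.Set.ofList (pvScanDigits g.toList) = ['2'] := by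
      refine pvEqSingleton (PySem.Set.nodup_ofList _) ?_ ?_
      · exact (hS '2').2 ⟨by simp, h2⟩
      · intro x hx
        rcases (hS x).1 hx with ⟨hd, hp⟩
        rcases hd with rfl|rfl|rfl|rfl|rfl <;> [exact absurd hp h1; rfl; exact absurd hp h3; exact absurd hp h4; exact absurd hp h5]
    rw [hB]
    simp [pvLabelsDict, List.filter, List.find?, t1, t2, t3, t4, t5, b1, b2, b3, b4, b5, h1, h2, h3, h4, h5, pvPick]
  · -- branch
    rw [pvPick_two ((hS '3').2 ⟨by simp, h3⟩) ((hS '4').2 ⟨by simp, h4⟩) (by decide)]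
    simp [pvLabelsDict, List.filter, List.find?, t1, t2, t3, t4, t5, b1, b2, b3, b4, b5, h1, h2, h3, h4, h5, pvPick]
  · -- branch
    rw [pvPick_two ((hS '3').2 ⟨by simp, h3⟩) ((hS '4').2 ⟨by simp, h4⟩) (by decide)]
    simp [pvLabelsDict, List.filter, List.find?, t1, t2, t3, t4, t5, b1, b2, b3, b4, b5, h1, h2, h3, h4, h5, pvPick]
  · -- branch
    rw [pvPick_two ((hS '3').2 ⟨by simp, h3⟩) ((hS '5').2 ⟨by simp, h5⟩) (by decide)]
    simp [pvLabelsDict, List.filter, List.find?, t1, t2, t3, t4, t5, b1, b2, b3, b4, b5, h1, h2, h3, h4, h5, pvPick]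
  · -- branch
    have hB : PySem.Set.ofList (pvScanDigits g.toList) = ['3'] := by
      refine pvEqSingleton (PySem.Set.nodup_ofList _) ?_ ?_
      · exact (hS '3').2 ⟨by simp, h3⟩
      · intro x hx
        rcases (hS x).1 hx with ⟨hd, hp⟩
        rcases hd with rfl|rfl|rfl|rfl|rfl <;> [exact absurd hp h1; exact absurd hp h2; rfl; exact absurd hp h4; exact absurd hp h5]
    rw [hB]
    simp [pvLabelsDict, List.filter, List.find?, t1, t2, t3, t4, t5, b1, b2, b3, b4, b5, h1, h2, h3, h4, h5, pvPick]
  · -- branch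
    rw [pvPick_two ((hS '4').2 ⟨by simp, h4⟩) ((hS '5').2 ⟨by simp, h5⟩) (by decide)]
    simp [pvLabelsDict, List.filter, List.find?, t1, t2, t3, t4, t5, b1, b2, b3, b4, b5, h1, h2, h3, h4, h5, pvPick]
  · -- branch
    have hB : PySem.Set.ofList (pvScanDigits g.toList) = ['4'] := by
      refine pvEqSingleton (PySem.Set.nodup_ofList _) ?_ ?_
      · exact (hS '4').2 ⟨by simp, h4⟩
      · intro x hx
        rcases (hS x).1 hx with ⟨hd, hp⟩
        rcases hd with rfl|rfl|rfl|rfl|rfl <;> [exact absurd hp h1; exact absurd hp h2; exact absurd hp h3; rfl; exact absurd hp h5]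
    rw [hB]
    simp [pvLabelsDict, List.filter, List.find?, t1, t2, t3, t4, t5, b1, b2, b3, b4, b5, h1, h2, h3, h4, h5, pvPick]
  · -- branch
    have hB : PySem.Set.ofList (pvScanDigits g.toList) = ['5'] := by
      refine pvEqSingleton (PySem.Set.nodup_ofList _) ?_ ?_
      · exact (hS '5').2 ⟨by simp, h5⟩
      · intro x hx
        rcases (hS x).1 hx with ⟨hd, hp⟩
        rcases hd with rfl|rfl|rfl|rfl|rfl <;> [exact absurd hp h1; exact absurd hp h2; exact absurd hp h3; exact absurd hp h4; rfl]
    rw [hB]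
    simp [pvLabelsDict, List.filter, List.find?, t1, t2, t3, t4, t5, b1, b2, b3, b4, b5, h1, h2, h3, h4, h5, pvPick]
  · -- branch
    have hB : PySem.Set.ofList (pvScanDigits g.toList) = [] := by
      rw [List.eq_nil_iff_forall_not_mem]
      intro x hx
      rcases (hS x).1 hx with ⟨hd, hp⟩
      rcases hd with rfl|rfl|rfl|rfl|rfl <;> [exact h1 hp; exact h2 hp; exact h3 hp; exact h4 hp; exact h5 hp]
    rw [hB]
    simp [pvLabelsDict, List.filter, List.find?, t1, t2, t3, t4, t5, b1, b2, b3, b4, b5, h1, h2, h3, h4, h5, pvPick]
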